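-- pv_equiv track=rewrite | github.com/vadikamar/gfgcodingsolutions | Difficulty: Easy/Maximize Array Value After Rearrangement/maximize-array-value-after-rearrangement.py | Maximize
-- ===== SOURCE A (Python) =====
-- def Maximize(a):
--     # Complete the function
--     n=len(a)
--     a.sort()
--     s=0
--     m=pow(10,9)+7
--     for i in range(n):
--         s+=a[i]*i
--     return s%m
-- ===== SOURCE B (Python) =====
-- def Maximize(a):
--     # Same in-place sort as A; then the weighted sum via a running suffix
--     # accumulator (total += suffix-sum on each step) instead of index products.
--     a.sort()
--     m = 10**9 + 7
--     total = 0
--     suff = 0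
--     for i in range(len(a) - 1, 0, -1):
--         suff += a[i]
--         total += suff
--     return total % m
-- ===== Notes on version B (the rewrite author's own statement) =====
-- stated objective: alternative
-- what changed: Replaces the index-product loop sum(a[i]*i) with a backward walk that maintains a running suffix sum and adds it to the total each step, so no index multiplication is performed.
import Mathlib
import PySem

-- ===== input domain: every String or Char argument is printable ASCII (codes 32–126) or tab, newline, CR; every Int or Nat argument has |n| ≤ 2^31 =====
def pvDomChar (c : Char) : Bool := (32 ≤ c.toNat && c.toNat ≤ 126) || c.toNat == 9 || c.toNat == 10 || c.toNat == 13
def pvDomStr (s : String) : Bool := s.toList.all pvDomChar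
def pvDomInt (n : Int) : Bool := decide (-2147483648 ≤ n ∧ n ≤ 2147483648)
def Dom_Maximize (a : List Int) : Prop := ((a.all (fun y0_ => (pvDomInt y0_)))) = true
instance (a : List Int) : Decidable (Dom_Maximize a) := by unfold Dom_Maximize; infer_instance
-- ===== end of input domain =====

-- B computes the same sorted weighted sum via a running suffix accumulator instead of
-- index products (alternative decomposition, same asymptotic cost). Both A and B sort
-- the argument list in place in Python; the equivalence proved here is about the return value.

-- ===== PORT A =====
def Maximize (a : List Int) : Int :=
  let n : Int := PySem.List.len a
  let a := PySem.List.sorted a (fun x => x) false      -- a.sort()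
  let s : Int := 0
  let m : Int := 10 ^ 9 + 7
  let s := (PySem.List.pyRange 0 n 1).foldl (fun s i => s + PySem.List.pyGetD a i 0 * i) s
  PySem.Int.mod s m

-- ===== PORT B =====
def Maximize_alt (a : List Int) : Int :=
  let a := PySem.List.sorted a (fun x => x) false      -- a.sort()
  let m : Int := 10 ^ 9 + 7
  let st := (PySem.List.pyRange (PySem.List.len a - 1) 0 (-1)).foldl
      (fun (st : Int × Int) i =>
        let suff := st.2 + PySem.List.pyGetD a i 0
        (st.1 + suff, suff)) (0, 0)
  PySem.Int.mod st.1 m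

-- ===== PRECONDITION & SPEC =====
def Spec_Maximize (a : List Int) (out : Int) : Prop := out = Maximize_alt a
instance (a : List Int) (out : Int) : Decidable (Spec_Maximize a out) := by unfold Spec_Maximize; infer_instance

-- ===== CLAIM (what is proved, stated in full; the proofs are below) =====
def Claim_equal_Maximize : Prop := ∀ (a : List Int), Dom_Maximize a → Spec_Maximize a (Maximize a)

-- ===== LEMMAS AND PROOFS =====

-- Σ_{i=1}^{k} i * b[i]
def pvT (b : List Int) : Nat → Int
  | 0 => 0
  | k+1 => pvT b k + ((k : Int) + 1) * PySem.List.pyGetD b ((k : Int) + 1) 0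

-- Σ_{i=1}^{k} b[i]
def pvU (b : List Int) : Nat → Int
  | 0 => 0
  | k+1 => pvU b k + PySem.List.pyGetD b ((k : Int) + 1) 0

-- Σ_{i=0}^{k-1} b[i] * i
def pvF (b : List Int) : Nat → Int
  | 0 => 0
  | k+1 => pvF b k + PySem.List.pyGetD b (k : Int) 0 * (k : Int)

lemma pvA_loop (b : List Int) (k : Nat) (s : Int) :
    (PySem.List.pyRange 0 (k : Int) 1).foldl
      (fun s i => s + PySem.List.pyGetD b i 0 * i) s = s + pvF b k := by
  induction k generalizing s with
  | zero => simp [PySem.List.pyRange_one_eq_nil, pvF]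
  | succ k ih =>
    rw [show ((k + 1 : Nat) : Int) = (k : Int) + 1 by push_cast; ring,
        PySem.List.pyRange_one_succ_right (by positivity), List.foldl_append]
    simp [ih, pvF]
    ring

lemma pvB_loop (b : List Int) (k : Nat) (t s : Int) :
    (PySem.List.pyRange (k : Int) 0 (-1)).foldl
      (fun (st : Int × Int) i =>
        let suff := st.2 + PySem.List.pyGetD b i 0
        (st.1 + suff, suff)) (t, s)
      = (t + (k : Int) * s + pvT b k, s + pvU b k) := by
  induction k generalizing t s with
  | zero => simp [PySem.List.pyRange_neg_one_eq_nil, pvT, pvU]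
  | succ k ih =>
    rw [show ((k + 1 : Nat) : Int) = (k : Int) + 1 by push_cast; ring,
        PySem.List.pyRange_neg_one_cons (by positivity)]
    simp only [List.foldl_cons]
    rw [show (k : Int) + 1 - 1 = (k : Int) by ring]
    simp only [ih]
    simp [pvT, pvU]
    constructor <;> ring

lemma pvF_eq_pvT (b : List Int) (k : Nat) : pvF b (k + 1) = pvT b k := by
  induction k with
  | zero => simp [pvF, pvT]
  | succ k ih =>
    show pvF b (k + 1) + _ = _
    rw [ih]
    simp [pvT]
    ring

-- ===== VERDICT (by name: the statement is the Claim_ definition above) =====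
theorem Maximize_spec : Claim_equal_Maximize := by
  intro a _
  show Maximize a = Maximize_alt a
  unfold Maximize Maximize_alt
  simp only [PySem.List.len_eq, PySem.List.length_sorted]
  set b := PySem.List.sorted a (fun x => x) false with hb
  cases hn : a.length with
  | zero =>
    rw [show ((0:Nat):Int) = 0 from rfl,
        PySem.List.pyRange_one_eq_nil (le_refl 0),
        show (0:Int) - 1 = -1 from rfl,
        PySem.List.pyRange_neg_one_eq_nil (by norm_num)]
    rfl
  | succ k =>
    rw [show ((k + 1 : Nat) : Int) - 1 = (k : Int) by push_cast; ring,
        pvA_loop b (k + 1) 0, pvB_loop b k 0 0, pvF_eq_pvT]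
    ring_nf
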